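-- pv_equiv track=rewrite | github.com/smarin1982/SalFi | latam_scraper.py | _detect_doc_tier
-- ===== SOURCE A (Python) =====
-- PDF_KEYWORDS_TIER1 = [
--     # Spanish
--     "estados financieros",
--     "estado financiero",
--     "estados-financieros",
--     "estado-financiero",
--     "estados_financieros",
--     "estadosfinancieros",   # no-separator variant (e.g. nicepagecdn filenames)
--     "balance general",
--     "balance-general",
--     "balance_general",
--     "estado de situacion financiera",
--     "estado de resultados",
--     "estado de flujo",
--     "estados contables",
--     "cuentas anuales",
--     # English
--     "financial statements",
--     "financial-statements",
--     "balance sheet",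
-- ]
--
-- PDF_KEYWORDS_TIER2 = [
--     # Spanish
--     "informe anual",
--     "informe-anual",
--     "informe_anual",
--     "reporte anual",
--     "reporte-anual",
--     "memoria anual",
--     "memoria-anual",
--     "informe de gestion",
--     "informe-de-gestion",
--     "informe_de_gestion",
--     "informe de gestión",
--     "reporte de gestion",
--     "reporte-de-gestion",
--     "rendicion de cuentas",
--     "rendicion-de-cuentas",
--     # English
--     "annual report",
--     "annual-report",
--     "management report",
-- ]
--
-- def _detect_doc_tier(url: str) -> int:
--     """Return document tier inferred from the URL/filename.
--
--     1 = estados financieros (financial statements — highest trust)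
--     2 = informe de gestión / informe anual (management / annual report)
--     3 = generic or unrecognised
--
--     Used to decide whether a cached scraper profile can be reused: only T1
--     profiles are reused directly; T2/T3 profiles trigger a fresh search so
--     that a T1 document is preferred.
--     """
--     def _fold(s: str) -> str:
--         return (
--             s.replace("ó", "o").replace("é", "e").replace("á", "a")
--              .replace("í", "i").replace("ú", "u").replace("ñ", "n").replace("ü", "u")
--         )
--
--     url_n = _fold(url.lower())
--     for kw in PDF_KEYWORDS_TIER1:
--         if _fold(kw) in url_n:
--             return 1
--     for kw in PDF_KEYWORDS_TIER2:
--         if _fold(kw) in url_n: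
--             return 2
--     return 3
-- ===== SOURCE B (Python) =====
-- # Tier-1 / tier-2 keywords, pre-folded (accents removed, duplicates dropped).
-- _T1F = (
--     "estados financieros", "estado financiero", "estados-financieros",
--     "estado-financiero", "estados_financieros", "estadosfinancieros",
--     "balance general", "balance-general", "balance_general",
--     "estado de situacion financiera", "estado de resultados",
--     "estado de flujo", "estados contables", "cuentas anuales",
--     "financial statements", "financial-statements", "balance sheet",
-- )
--
-- _T2F = (
--     "informe anual", "informe-anual", "informe_anual",
--     "reporte anual", "reporte-anual", "memoria anual", "memoria-anual",
--     "informe de gestion", "informe-de-gestion", "informe_de_gestion",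
--     "reporte de gestion", "reporte-de-gestion",
--     "rendicion de cuentas", "rendicion-de-cuentas",
--     "annual report", "annual-report", "management report",
-- )
--
--
-- def _detect_doc_tier(url: str) -> int:
--     u = (
--         url.lower()
--         .replace("ó", "o").replace("é", "e").replace("á", "a")
--         .replace("í", "i").replace("ú", "u").replace("ñ", "n").replace("ü", "u")
--     )
--     best = 3
--     for i in range(len(u)):
--         if any(u.startswith(k, i) for k in _T1F):
--             return 1
--         if best == 3 and any(u.startswith(k, i) for k in _T2F):
--             best = 2
--     return best
-- ===== Notes on version B (the rewrite author's own statement) =====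
-- stated objective: alternative
-- what changed: Replaces A's two per-keyword substring-scan loops (one 'kw in url' scan per keyword, folding each keyword on the fly) by a single left-to-right scan over the positions of the once-folded URL that tests pre-folded keyword prefixes at each position, tracking the best tier found.
import Mathlib
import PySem

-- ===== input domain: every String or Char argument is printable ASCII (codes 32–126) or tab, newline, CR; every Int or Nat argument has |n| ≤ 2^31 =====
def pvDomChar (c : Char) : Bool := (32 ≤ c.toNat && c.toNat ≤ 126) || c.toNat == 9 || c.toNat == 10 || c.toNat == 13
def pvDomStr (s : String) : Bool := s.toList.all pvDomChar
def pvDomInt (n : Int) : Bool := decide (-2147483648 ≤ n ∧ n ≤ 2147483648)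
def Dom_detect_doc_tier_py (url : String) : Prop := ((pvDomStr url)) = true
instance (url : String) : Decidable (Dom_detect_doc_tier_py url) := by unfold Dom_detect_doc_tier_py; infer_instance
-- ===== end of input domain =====

-- B replaces A's two per-keyword substring-scan loops by a single left-to-right
-- scan over the positions of the (once-folded) URL, testing pre-folded keyword
-- prefixes at each position; objective: alternative (same result, different traversal).

-- ===== PORT A =====
def pvT1 : List String := ["estados financieros", "estado financiero", "estados-financieros",
  "estado-financiero", "estados_financieros", "estadosfinancieros", "balance general",
  "balance-general", "balance_general", "estado de situacion financiera",
  "estado de resultados", "estado de flujo", "estados contables", "cuentas anuales",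
  "financial statements", "financial-statements", "balance sheet"]

def pvT2 : List String := ["informe anual", "informe-anual", "informe_anual",
  "reporte anual", "reporte-anual", "memoria anual", "memoria-anual",
  "informe de gestion", "informe-de-gestion", "informe_de_gestion",
  "informe de gestión", "reporte de gestion", "reporte-de-gestion",
  "rendicion de cuentas", "rendicion-de-cuentas", "annual report", "annual-report",
  "management report"]

def pvFoldA (s : String) : String :=
  PySem.Str.replace (PySem.Str.replace (PySem.Str.replace (PySem.Str.replace
    (PySem.Str.replace (PySem.Str.replace (PySem.Str.replace s "ó" "o") "é" "e")
      "á" "a") "í" "i") "ú" "u") "ñ" "n") "ü" "u"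

def pvLoop2A : List String → String → Int
  | [], _ => 3
  | kw :: rest, url_n =>
    if PySem.Str.isIn (pvFoldA kw) url_n then 2 else pvLoop2A rest url_n

def pvLoop1A : List String → String → Int
  | [], url_n => pvLoop2A pvT2 url_n
  | kw :: rest, url_n =>
    if PySem.Str.isIn (pvFoldA kw) url_n then 1 else pvLoop1A rest url_n

def detect_doc_tier_py (url : String) : Int :=
  pvLoop1A pvT1 (pvFoldA (PySem.Str.lower url))

-- ===== PORT B =====
def pvT1F : List (List Char) := [("estados financieros").toList, ("estado financiero").toList,
  ("estados-financieros").toList, ("estado-financiero").toList, ("estados_financieros").toList,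
  ("estadosfinancieros").toList, ("balance general").toList, ("balance-general").toList,
  ("balance_general").toList, ("estado de situacion financiera").toList,
  ("estado de resultados").toList, ("estado de flujo").toList, ("estados contables").toList,
  ("cuentas anuales").toList, ("financial statements").toList, ("financial-statements").toList,
  ("balance sheet").toList]

def pvT2F : List (List Char) := [("informe anual").toList, ("informe-anual").toList,
  ("informe_anual").toList, ("reporte anual").toList, ("reporte-anual").toList,
  ("memoria anual").toList, ("memoria-anual").toList, ("informe de gestion").toList,
  ("informe-de-gestion").toList, ("informe_de_gestion").toList, ("reporte de gestion").toList,
  ("reporte-de-gestion").toList, ("rendicion de cuentas").toList, ("rendicion-de-cuentas").toList,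
  ("annual report").toList, ("annual-report").toList, ("management report").toList]

def pvFoldB (cs : List Char) : List Char :=
  PySem.Chars.replace (PySem.Chars.replace (PySem.Chars.replace (PySem.Chars.replace
    (PySem.Chars.replace (PySem.Chars.replace (PySem.Chars.replace cs
      ("ó").toList ("o").toList) ("é").toList ("e").toList) ("á").toList ("a").toList)
      ("í").toList ("i").toList) ("ú").toList ("u").toList) ("ñ").toList ("n").toList)
      ("ü").toList ("u").toList

def pvScanB : List Char → Int → Int
  | [], best => best
  | c :: rest, best =>
    if pvT1F.any (fun k => PySem.Chars.startswith (c :: rest) k) then 1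
    else pvScanB rest
      (if best == 3 && pvT2F.any (fun k => PySem.Chars.startswith (c :: rest) k) then 2 else best)

def detect_doc_tier_py_alt (url : String) : Int :=
  pvScanB (pvFoldB (PySem.Chars.lower url.toList)) 3

-- ===== PRECONDITION & SPEC =====
def Spec_detect_doc_tier_py (url : String) (out : Int) : Prop := out = detect_doc_tier_py_alt url
instance (url : String) (out : Int) : Decidable (Spec_detect_doc_tier_py url out) := by unfold Spec_detect_doc_tier_py; infer_instance

-- ===== CLAIM (what is proved, stated in full; the proofs are below) =====
def Claim_equal_detect_doc_tier_py : Prop := ∀ (url : String), Dom_detect_doc_tier_py url → Spec_detect_doc_tier_py url (detect_doc_tier_py url)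

-- ===== LEMMAS AND PROOFS =====

-- infix splitting at the head: k is an infix of c::rest iff it is a prefix there or an infix of rest
lemma pvInfixSplit (L : List (List Char)) (c : Char) (rest : List Char) :
    (∃ k ∈ L, k <:+: c :: rest) ↔ (∃ k ∈ L, k <+: c :: rest) ∨ ∃ k ∈ L, k <:+: rest := by
  constructor
  · rintro ⟨k, hk, hinf⟩
    rcases List.infix_cons_iff.mp hinf with h | h
    · exact Or.inl ⟨k, hk, h⟩
    · exact Or.inr ⟨k, hk, h⟩
  · rintro (⟨k, hk, h⟩ | ⟨k, hk, h⟩)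
    · exact ⟨k, hk, h.isInfix⟩
    · exact ⟨k, hk, List.infix_cons_iff.mpr (Or.inr h)⟩

-- the head test of B's scan, as the existence of a keyword prefix
lemma pvAnyStarts (L : List (List Char)) (s : List Char) :
    L.any (fun k => PySem.Chars.startswith s k) = true ↔ ∃ k ∈ L, k <+: s := by
  simp only [List.any_eq_true, PySem.Chars.startswith_iff]

-- B's scan, started with best = 2: tier 1 if some tier-1 keyword is an infix, else 2.
lemma pvScanB_two (s : List Char) :
    pvScanB s 2 = if ∃ k ∈ pvT1F, k <:+: s then 1 else 2 := by
  induction s with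
  | nil =>
    simp only [pvScanB]
    rw [if_neg (by decide : ¬ ∃ k ∈ pvT1F, k <:+: ([] : List Char))]
  | cons c rest ih =>
    simp only [pvScanB, show ((2 : Int) == 3) = false from rfl, Bool.false_and,
      Bool.false_eq_true, if_false, ih]
    by_cases h1 : ∃ k ∈ pvT1F, k <+: c :: rest
    · rw [if_pos ((pvAnyStarts pvT1F (c :: rest)).mpr h1),
        if_pos ((pvInfixSplit pvT1F c rest).mpr (Or.inl h1))]
    · have hT1 : (∃ k ∈ pvT1F, k <:+: c :: rest) ↔ ∃ k ∈ pvT1F, k <:+: rest :=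
        ⟨fun h => ((pvInfixSplit pvT1F c rest).mp h).resolve_left h1,
         fun h => (pvInfixSplit pvT1F c rest).mpr (Or.inr h)⟩
      rw [if_neg (fun hc => h1 ((pvAnyStarts pvT1F (c :: rest)).mp hc))]
      simp only [hT1]

-- B's scan from best = 3 computes the tiered infix test.
lemma pvScanB_three (s : List Char) :
    pvScanB s 3 = if ∃ k ∈ pvT1F, k <:+: s then 1
      else if ∃ k ∈ pvT2F, k <:+: s then 2 else 3 := by
  induction s with
  | nil =>
    simp only [pvScanB]
    rw [if_neg (by decide : ¬ ∃ k ∈ pvT1F, k <:+: ([] : List Char)),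
      if_neg (by decide : ¬ ∃ k ∈ pvT2F, k <:+: ([] : List Char))]
  | cons c rest ih =>
    simp only [pvScanB, show ((3 : Int) == 3) = true from rfl, Bool.true_and]
    by_cases h1 : ∃ k ∈ pvT1F, k <+: c :: rest
    · rw [if_pos ((pvAnyStarts pvT1F (c :: rest)).mpr h1),
        if_pos ((pvInfixSplit pvT1F c rest).mpr (Or.inl h1))]
    · have hT1 : (∃ k ∈ pvT1F, k <:+: c :: rest) ↔ ∃ k ∈ pvT1F, k <:+: rest :=
        ⟨fun h => ((pvInfixSplit pvT1F c rest).mp h).resolve_left h1,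
         fun h => (pvInfixSplit pvT1F c rest).mpr (Or.inr h)⟩
      rw [if_neg (fun hc => h1 ((pvAnyStarts pvT1F (c :: rest)).mp hc))]
      by_cases h2 : ∃ k ∈ pvT2F, k <+: c :: rest
      · rw [if_pos ((pvAnyStarts pvT2F (c :: rest)).mpr h2), pvScanB_two rest]
        have hi2 : ∃ k ∈ pvT2F, k <:+: c :: rest := (pvInfixSplit pvT2F c rest).mpr (Or.inl h2)
        simp [hT1, hi2]
      · rw [if_neg (fun hc => h2 ((pvAnyStarts pvT2F (c :: rest)).mp hc)), ih]
        have hT2 : (∃ k ∈ pvT2F, k <:+: c :: rest) ↔ ∃ k ∈ pvT2F, k <:+: rest :=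
          ⟨fun h => ((pvInfixSplit pvT2F c rest).mp h).resolve_left h2,
           fun h => (pvInfixSplit pvT2F c rest).mpr (Or.inr h)⟩
        simp only [hT1, hT2]

-- A's tier-2 loop is the any-infix test over the folded tier-2 keywords.
lemma pvLoop2A_eq (kws : List String) (u : String) :
    pvLoop2A kws u =
      if kws.any (fun kw => PySem.Str.isIn (pvFoldA kw) u) then 2 else 3 := by
  induction kws with
  | nil => simp [pvLoop2A]
  | cons kw rest ih =>
    simp only [pvLoop2A, List.any_cons, ih, Bool.or_eq_true]
    by_cases h : PySem.Str.isIn (pvFoldA kw) u = true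
    · rw [if_pos h, if_pos (Or.inl h)]
    · rw [if_neg h]
      by_cases h2 : (rest.any fun kw => PySem.Str.isIn (pvFoldA kw) u) = true
      · rw [if_pos h2, if_pos (Or.inr h2)]
      · rw [if_neg h2, if_neg (by tauto)]

-- A's tier-1 loop likewise, falling through to the tier-2 loop.
lemma pvLoop1A_eq (kws : List String) (u : String) :
    pvLoop1A kws u =
      if kws.any (fun kw => PySem.Str.isIn (pvFoldA kw) u) then 1 else pvLoop2A pvT2 u := by
  induction kws with
  | nil => simp [pvLoop1A]
  | cons kw rest ih =>
    simp only [pvLoop1A, List.any_cons, ih, Bool.or_eq_true]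
    by_cases h : PySem.Str.isIn (pvFoldA kw) u = true
    · rw [if_pos h, if_pos (Or.inl h)]
    · rw [if_neg h]
      by_cases h2 : (rest.any fun kw => PySem.Str.isIn (pvFoldA kw) u) = true
      · rw [if_pos h2, if_pos (Or.inr h2)]
      · rw [if_neg h2, if_neg (by tauto)]

-- the String-level any over A's folded keywords is the infix test over B's pre-folded list
-- (same keywords up to folding and duplicates; membership both ways is decided on the constants)
lemma pvAny_fold (kws : List String) (kwsF : List (List Char))
    (hsub : ∀ x ∈ kws.map (fun kw => (pvFoldA kw).toList), x ∈ kwsF)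
    (hsup : ∀ x ∈ kwsF, x ∈ kws.map (fun kw => (pvFoldA kw).toList)) (u : String) :
    (kws.any (fun kw => PySem.Str.isIn (pvFoldA kw) u) = true)
      ↔ ∃ k ∈ kwsF, k <:+: u.toList := by
  simp only [List.any_eq_true, PySem.Str.isIn_iff_infix]
  constructor
  · rintro ⟨kw, hk, h⟩
    exact ⟨(pvFoldA kw).toList, hsub _ (List.mem_map_of_mem hk), h⟩
  · rintro ⟨k, hk, h⟩
    obtain ⟨kw, hkw, rfl⟩ := List.mem_map.mp (hsup _ hk)
    exact ⟨kw, hkw, h⟩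

-- A's folding on strings is B's folding on the underlying character lists.
lemma pvFoldA_toList (s : String) : (pvFoldA s).toList = pvFoldB s.toList := by
  simp [pvFoldA, pvFoldB]

-- membership facts relating A's folded constant lists to B's pre-folded constants
set_option maxRecDepth 100000 in
lemma pvT1_mem : (∀ x ∈ pvT1.map (fun kw => (pvFoldA kw).toList), x ∈ pvT1F)
    ∧ ∀ x ∈ pvT1F, x ∈ pvT1.map (fun kw => (pvFoldA kw).toList) := by decide

set_option maxRecDepth 100000 in
lemma pvT2_mem : (∀ x ∈ pvT2.map (fun kw => (pvFoldA kw).toList), x ∈ pvT2F)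
    ∧ ∀ x ∈ pvT2F, x ∈ pvT2.map (fun kw => (pvFoldA kw).toList) := by decide

-- ===== VERDICT (by name: the statement is the Claim_ definition above) =====
theorem detect_doc_tier_py_spec : Claim_equal_detect_doc_tier_py := by
  intro url _
  unfold Spec_detect_doc_tier_py detect_doc_tier_py detect_doc_tier_py_alt
  set u := pvFoldA (PySem.Str.lower url) with hu
  have huL : pvFoldB (PySem.Chars.lower url.toList) = u.toList := by
    rw [hu, pvFoldA_toList]
    simp [PySem.Str.toList_lower]
  rw [huL, pvLoop1A_eq, pvLoop2A_eq, pvScanB_three]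
  have h1 := pvAny_fold pvT1 pvT1F pvT1_mem.1 pvT1_mem.2 u
  have h2 := pvAny_fold pvT2 pvT2F pvT2_mem.1 pvT2_mem.2 u
  by_cases a1 : ∃ k ∈ pvT1F, k <:+: u.toList
  · rw [if_pos (h1.mpr a1), if_pos a1]
  · rw [if_neg (fun hc => a1 (h1.mp hc)), if_neg a1]
    by_cases a2 : ∃ k ∈ pvT2F, k <:+: u.toList
    · rw [if_pos (h2.mpr a2), if_pos a2]
    · rw [if_neg (fun hc => a2 (h2.mp hc)), if_neg a2]
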